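-- pv_equiv track=rewrite | github.com/k-harada/AtCoder | other_contests/PAST202005/J.py | solve
-- ===== SOURCE A (Python) =====
-- from bisect import bisect_right
--
-- def solve(n, m, a_list):
--     taste_list = [0] * n
--     res_list = [0] * m
--     for i, a in enumerate(a_list):
--         j = bisect_right(taste_list, -a)
--         if j == n:
--             res_list[i] = -1
--         else:
--             res_list[i] = j + 1
--             taste_list[j] = -a
--     return res_list
-- ===== SOURCE B (Python) =====
-- def solve(n, m, a_list):
--     taste_list = [0] * n
--     res_list = [0] * m
--     for i, a in enumerate(a_list):
--         for j in range(n):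
--             if taste_list[j] > -a:
--                 res_list[i] = j + 1
--                 taste_list[j] = -a
--                 break
--         else:
--             res_list[i] = -1
--     return res_list
-- ===== Notes on version B (the rewrite author's own statement) =====
-- stated objective: simpler
-- what changed: Replaces the bisect_right binary search over the sorted taste array with a direct linear scan for the first strictly greater slot (for/else with break), dropping the bisect import.
import Mathlib
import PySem

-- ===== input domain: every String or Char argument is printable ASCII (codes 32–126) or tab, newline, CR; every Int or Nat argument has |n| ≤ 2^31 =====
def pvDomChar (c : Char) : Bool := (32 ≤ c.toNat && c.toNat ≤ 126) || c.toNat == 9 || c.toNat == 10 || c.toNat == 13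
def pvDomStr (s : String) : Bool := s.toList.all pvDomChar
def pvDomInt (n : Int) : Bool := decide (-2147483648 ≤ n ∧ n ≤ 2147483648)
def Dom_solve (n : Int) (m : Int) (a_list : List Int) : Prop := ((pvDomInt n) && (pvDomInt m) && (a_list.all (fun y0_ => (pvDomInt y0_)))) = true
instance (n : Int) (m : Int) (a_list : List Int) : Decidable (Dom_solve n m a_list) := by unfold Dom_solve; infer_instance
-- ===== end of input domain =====

-- B replaces A's bisect_right binary search by a linear scan for the first strictly
-- greater slot; objective: simpler (no bisect import). Equivalence on the inputs where
-- A returns normally (Pre_solve below).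

-- ===== PORT A =====
-- bisect.bisect_right(a, x): lo = 0, hi = len(a); while lo < hi: mid = (lo+hi)//2;
--   if x < a[mid]: hi = mid else lo = mid+1; return lo.
-- a[mid] is ported as getD mid 0 (mid is always in range when lo < hi ≤ len).
def bisectRightGo (ts : List Int) (x : Int) (lo hi : Nat) : Nat :=
  if h : lo < hi then
    if x < ts.getD ((lo + hi) / 2) 0 then bisectRightGo ts x lo ((lo + hi) / 2)
    else bisectRightGo ts x ((lo + hi) / 2 + 1) hi
  else lo
termination_by hi - lo
decreasing_by
  · omega
  · omega

-- one iteration of A's loop body; state = (i, taste_list, res_list)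
def stepA (n : Int) (st : Nat × List Int × List Int) (a : Int) : Nat × List Int × List Int :=
  let j := bisectRightGo st.2.1 (-a) 0 st.2.1.length
  if (j : Int) = n then (st.1 + 1, st.2.1, st.2.2.set st.1 (-1))
  else (st.1 + 1, st.2.1.set j (-a), st.2.2.set st.1 ((j : Int) + 1))

def solve (n : Int) (m : Int) (a_list : List Int) : List Int :=
  (a_list.foldl (stepA n) (0, List.replicate n.toNat 0, List.replicate m.toNat 0)).2.2

-- ===== PORT B =====
-- B's inner 'for j in range(n): if taste_list[j] > -a: … break / else' scan:
-- first index whose entry is strictly greater than x, none if there is none.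
def firstGreater (ts : List Int) (x : Int) : Option Nat :=
  match ts with
  | [] => none
  | t :: rest => if x < t then some 0 else (firstGreater rest x).map (· + 1)

-- one iteration of B's loop body; state = (i, taste_list, res_list)
def stepB (st : Nat × List Int × List Int) (a : Int) : Nat × List Int × List Int :=
  match firstGreater st.2.1 (-a) with
  | none => (st.1 + 1, st.2.1, st.2.2.set st.1 (-1))
  | some j => (st.1 + 1, st.2.1.set j (-a), st.2.2.set st.1 ((j : Int) + 1))

def solve_alt (n : Int) (m : Int) (a_list : List Int) : List Int :=
  (a_list.foldl stepB (0, List.replicate n.toNat 0, List.replicate m.toNat 0)).2.2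

-- ===== PRECONDITION & SPEC =====
-- Pre_ excludes exactly the inputs where A raises IndexError: len(a_list) > m (writing
-- res_list[i] out of range), or n < 0 with a nonempty a_list (taste_list is empty but
-- bisect_right returns 0 ≠ n, so taste_list[0] is written).
def Pre_solve (n : Int) (m : Int) (a_list : List Int) : Prop :=
  (a_list.length : Int) ≤ m ∧ (0 ≤ n ∨ a_list = [])
instance (n : Int) (m : Int) (a_list : List Int) : Decidable (Pre_solve n m a_list) := by
  unfold Pre_solve; infer_instance

def pvWitness_solve : Int × Int × List Int := (3, 4, [5, 2, 7, 2])

def Spec_solve (n : Int) (m : Int) (a_list : List Int) (out : List Int) : Prop := out = solve_alt n m a_list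
instance (n : Int) (m : Int) (a_list : List Int) (out : List Int) : Decidable (Spec_solve n m a_list out) := by unfold Spec_solve; infer_instance

-- ===== CLAIM (what is proved, stated in full; the proofs are below) =====
def Claim_equal_solve : Prop := ∀ (n : Int) (m : Int) (a_list : List Int), Dom_solve n m a_list → Pre_solve n m a_list → Spec_solve n m a_list (solve n m a_list)

-- ===== LEMMAS AND PROOFS =====

-- k := index returned by the linear scan (length if none): basic properties.
theorem fg_props (ts : List Int) (x : Int) :
    (firstGreater ts x).getD ts.length ≤ ts.length ∧
    (∀ i, i < (firstGreater ts x).getD ts.length → ts.getD i 0 ≤ x) ∧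
    ((firstGreater ts x).getD ts.length < ts.length →
      x < ts.getD ((firstGreater ts x).getD ts.length) 0) := by
  induction ts with
  | nil => simp [firstGreater]
  | cons t rest ih =>
    by_cases h : x < t
    · simp [firstGreater, h]
    · have hmap : ((firstGreater rest x).map (· + 1)).getD (rest.length + 1)
          = (firstGreater rest x).getD rest.length + 1 := by
        cases firstGreater rest x <;> simp
      refine ⟨?_, ?_, ?_⟩ <;> simp only [firstGreater, if_neg h, List.length_cons, hmap]
      · omega
      · intro i hi
        cases i with
        | zero => simpa using not_lt.mp h
        | succ i' => exact ih.2.1 i' (by omega)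
      · intro hlt
        simpa using ih.2.2 (by omega)

-- a sorted list is monotone at getD indices in range
theorem sorted_getD_mono (ts : List Int) (hs : List.Pairwise (· ≤ ·) ts)
    {i j : Nat} (hij : i ≤ j) (hj : j < ts.length) : ts.getD i 0 ≤ ts.getD j 0 := by
  rcases eq_or_lt_of_le hij with rfl | hlt
  · exact le_refl _
  · have := (List.pairwise_iff_getElem.mp hs) i j (by omega) hj hlt
    simpa [List.getD_eq_getElem, hj, (by omega : i < ts.length)] using this

-- the binary search returns exactly the linear-scan index
theorem bisect_eq_fg (ts : List Int) (x : Int) (hs : List.Pairwise (· ≤ ·) ts) :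
    ∀ lo hi, lo ≤ (firstGreater ts x).getD ts.length →
      (firstGreater ts x).getD ts.length ≤ hi → hi ≤ ts.length →
      bisectRightGo ts x lo hi = (firstGreater ts x).getD ts.length := by
  intro lo hi
  induction lo, hi using bisectRightGo.induct ts x with
  | case1 lo hi h h2 ih =>
    intro h1 h2' h3
    rw [bisectRightGo]
    rw [dif_pos h, if_pos h2]
    refine ih h1 ?_ (by omega)
    -- x < ts[mid] forces k ≤ mid
    by_contra hk
    have := (fg_props ts x).2.1 ((lo + hi) / 2) (by omega)
    omega
  | case2 lo hi h h2 ih =>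
    intro h1 h2' h3
    rw [bisectRightGo]
    rw [dif_pos h, if_neg h2]
    refine ih ?_ h2' h3
    -- ts[mid] ≤ x forces mid < k (else x < ts[k] ≤ ts[mid])
    by_contra hk
    have hklen : (firstGreater ts x).getD ts.length < ts.length := by omega
    have hx := (fg_props ts x).2.2 hklen
    have := sorted_getD_mono ts hs (i := (firstGreater ts x).getD ts.length)
      (j := (lo + hi) / 2) (by omega) (by omega)
    omega
  | case3 lo hi h =>
    intro h1 h2' _
    rw [bisectRightGo, dif_neg h]
    omega

-- the overwrite at the scan index keeps the list sorted
-- the linear scan's index is always in range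
theorem fg_lt_len (ts : List Int) (x : Int) :
    ∀ j, firstGreater ts x = some j → j < ts.length := by
  induction ts with
  | nil => simp [firstGreater]
  | cons t rest ih =>
    intro j hj
    by_cases h : x < t
    · simp only [firstGreater, if_pos h, Option.some.injEq] at hj
      simp [← hj]
    · simp only [firstGreater, if_neg h, List.length_cons] at hj ⊢
      cases hr : firstGreater rest x with
      | none => rw [hr] at hj; simp at hj
      | some j' =>
        rw [hr] at hj
        simp at hj
        have := ih j' hr
        omega

theorem set_fg_sorted (ts : List Int) (x : Int) (hs : List.Pairwise (· ≤ ·) ts)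
    {j : Nat} (hj : firstGreater ts x = some j) :
    List.Pairwise (· ≤ ·) (ts.set j x) := by
  have hjlen : j < ts.length := fg_lt_len ts x j hj
  have hprops := fg_props ts x
  rw [hj] at hprops
  simp only [Option.getD_some] at hprops
  rw [List.pairwise_iff_getElem]
  intro p q hp hq hpq
  simp only [List.length_set] at hp hq
  rw [List.getElem_set, List.getElem_set]
  have hmono := List.pairwise_iff_getElem.mp hs
  split_ifs with h1 h2 h2
  · omega
  · -- p = j < q : x < ts[j] would give x ≤ ts[q]; here x ≤ ts[q] via sorted
    subst h1
    have : ts.getD j 0 ≤ ts.getD q 0 := sorted_getD_mono ts hs (le_of_lt hpq) hq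
    have hxj := hprops.2.2 hjlen
    simp [hjlen, hq] at this hxj
    omega
  · -- q = j > p : ts[p] ≤ x by "everything before j is ≤ x"
    subst h2
    have := hprops.2.1 p hpq
    simp [hp] at this
    exact this
  · exact hmono p q hp hq hpq

-- one loop iteration of A equals one of B on a sorted taste list of length n
theorem step_eq (n : Int) (hn : 0 ≤ n) (st : Nat × List Int × List Int)
    (hs : List.Pairwise (· ≤ ·) st.2.1) (hl : st.2.1.length = n.toNat) (a : Int) :
    stepA n st a = stepB st a := by
  have hb := bisect_eq_fg st.2.1 (-a) hs 0 st.2.1.length (by omega)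
    (fg_props st.2.1 (-a)).1 (le_refl _)
  unfold stepA stepB
  cases hfg : firstGreater st.2.1 (-a) with
  | none =>
    rw [hfg] at hb
    simp only [Option.getD_none] at hb
    rw [hb, if_pos (by omega : ((st.2.1.length : Nat) : Int) = n)]
  | some j =>
    rw [hfg] at hb
    simp only [Option.getD_some] at hb
    have hjlen : j < st.2.1.length := fg_lt_len st.2.1 (-a) j hfg
    rw [hb, if_neg (by omega : ¬ ((j : Nat) : Int) = n)]

-- the full loops agree, by induction along a_list with the sortedness/length invariant
theorem fold_eq (n : Int) (hn : 0 ≤ n) :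
    ∀ (l : List Int) (i : Nat) (ts rs : List Int),
      List.Pairwise (· ≤ ·) ts → ts.length = n.toNat →
      l.foldl (stepA n) (i, ts, rs) = l.foldl stepB (i, ts, rs) := by
  intro l
  induction l with
  | nil => intro _ _ _ _ _; rfl
  | cons a l ih =>
    intro i ts rs hs hl
    have hstep := step_eq n hn (i, ts, rs) hs hl a
    simp only [List.foldl_cons, hstep]
    cases hfg : firstGreater ts (-a) with
    | none =>
      simp only [stepB, hfg]
      exact ih _ _ _ hs hl
    | some j =>
      simp only [stepB, hfg]
      exact ih _ _ _ (set_fg_sorted ts (-a) hs hfg) (by simp [hl])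

-- ===== VERDICT (by name: the statement is the Claim_ definition above) =====
theorem solve_spec : Claim_equal_solve := by
  intro n m a_list _hdom hpre
  unfold Spec_solve solve solve_alt
  rcases hpre.2 with hn | hnil
  · rw [fold_eq n hn a_list 0 _ _ (by simp [List.pairwise_replicate]) (by simp)]
  · subst hnil; rfl
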